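-- pv_equiv track=rewrite | github.com/UARR7/Project-Work-1 | docs_generator.py | _extract_python_docstring
-- ===== SOURCE A (Python) =====
-- from typing import Dict, List, Optional, Any
--
-- def _extract_python_docstring(lines: List[str], start_line: int) -> str:
--     """Extract Python docstring from function/class definition"""
--     docstring = ''
--     for j in range(start_line, min(start_line + 10, len(lines))):
--         if '"""' in lines[j] or "'''" in lines[j]:
--             # Found docstring start
--             doc_lines = []
--             for k in range(j, len(lines)):
--                 doc_lines.append(lines[k])
--                 if k > j and ('"""' in lines[k] or "'''" in lines[k]):
--                     break
--             docstring = '\n'.join(doc_lines)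
--             break
--     return docstring
-- ===== SOURCE B (Python) =====
-- def _extract_python_docstring(lines, start_line):
--     """Extract Python docstring from function/class definition"""
--     return _search(lines[start_line:], 10)
--
-- def _search(rest, budget):
--     # looking for the opening delimiter within the 10-line window
--     if budget == 0 or not rest:
--         return ''
--     head = rest[0]
--     if '"""' in head or "'''" in head:
--         return head + _collect(rest[1:])
--     return _search(rest[1:], budget - 1)
--
-- def _collect(rest):
--     # collecting lines up to and including the closing delimiter
--     if not rest:
--         return ''
--     head = rest[0]
--     if '"""' in head or "'''" in head:
--         return '\n' + head
--     return '\n' + head + _collect(rest[1:])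
-- ===== Notes on version B (the rewrite author's own statement) =====
-- stated objective: alternative
-- what changed: B is a recursive state machine over the list suffix lines[start_line:]: a 'search' phase with a countdown budget that switches into a 'collect' phase building the result by string concatenation, instead of A's nested index loops that append lines to a list and join them.
-- outside the precondition, e.g. on _extract_python_docstring(['"""d"""', 'x'], -2): A returns '"""d"""\nx\n"""d"""', B returns '"""d"""\nx'
import Mathlib
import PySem

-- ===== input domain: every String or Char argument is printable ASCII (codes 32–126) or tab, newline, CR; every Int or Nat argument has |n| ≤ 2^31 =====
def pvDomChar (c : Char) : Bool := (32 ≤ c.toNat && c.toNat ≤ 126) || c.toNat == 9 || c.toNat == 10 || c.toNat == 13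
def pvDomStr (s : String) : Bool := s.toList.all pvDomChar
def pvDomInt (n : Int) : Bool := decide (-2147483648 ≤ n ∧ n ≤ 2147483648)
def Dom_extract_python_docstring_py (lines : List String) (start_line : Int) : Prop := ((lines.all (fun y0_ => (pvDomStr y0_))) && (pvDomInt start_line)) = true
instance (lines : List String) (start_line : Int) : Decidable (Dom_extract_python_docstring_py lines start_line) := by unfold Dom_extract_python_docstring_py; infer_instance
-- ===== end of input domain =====

-- B is a recursive search/collect state machine over the suffix lines[start_line:], building the
-- result by string concatenation, instead of A's nested index loops that append to a list and join
-- (objective: alternative, same cost).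

-- '"""' in s or "'''" in s
def pvHasDelim (s : String) : Bool := PySem.Str.isIn "\"\"\"" s || PySem.Str.isIn "'''" s

-- ===== PORT A =====
-- inner loop: for k in range(j, len(lines)): doc_lines.append(lines[k]); if k > j and delim: break
def pvA_inner (lines : List String) (j : Int) : List Int → List String → List String
  | [], acc => acc.reverse
  | k :: rest, acc =>
      let acc' := PySem.List.pyGetD lines k "" :: acc
      if j < k ∧ pvHasDelim (PySem.List.pyGetD lines k "") = true then acc'.reverse
      else pvA_inner lines j rest acc'

-- outer loop: first j with a delimiter sets docstring and breaks; docstring starts as ''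
def pvA_outer (lines : List String) : List Int → String
  | [] => ""
  | j :: rest =>
      if pvHasDelim (PySem.List.pyGetD lines j "") = true then
        PySem.Str.join "\n" (pvA_inner lines j (PySem.List.pyRange j (PySem.List.len lines) 1) [])
      else pvA_outer lines rest

def extract_python_docstring_py (lines : List String) (start_line : Int) : String :=
  pvA_outer lines (PySem.List.pyRange start_line (min (start_line + 10) (PySem.List.len lines)) 1)

-- ===== PORT B =====
-- _collect(rest): collecting lines up to and including the closing delimiter
def pvB_collect : List String → String
  | [] => ""
  | h :: t => if pvHasDelim h = true then "\n" ++ h else "\n" ++ h ++ pvB_collect t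

-- _search(rest, budget): looking for the opening delimiter within the 10-line window
def pvB_search : List String → Nat → String
  | _, 0 => ""
  | [], _ + 1 => ""
  | h :: t, b + 1 => if pvHasDelim h = true then h ++ pvB_collect t else pvB_search t b

def extract_python_docstring_py_alt (lines : List String) (start_line : Int) : String :=
  pvB_search (PySem.List.slice lines (some start_line) none) 10

-- ===== PRECONDITION & SPEC =====
-- Pre_ restricts start_line to nonnegative values, the natural domain of a line number:
-- for negative start_line A relies on Python's negative-index wraparound (or raises
-- IndexError once the offset exceeds the list length), behaviour outside the task's
-- natural domain which B's slice-based reading does not reproduce.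
def Pre_extract_python_docstring_py (lines : List String) (start_line : Int) : Prop :=
  0 ≤ start_line
instance (lines : List String) (start_line : Int) : Decidable (Pre_extract_python_docstring_py lines start_line) := by unfold Pre_extract_python_docstring_py; infer_instance

def pvWitness_extract_python_docstring_py : List String × Int := (["def f():", "    \"\"\"doc\"\"\"", "    pass"], 0)

def Spec_extract_python_docstring_py (lines : List String) (start_line : Int) (out : String) : Prop := out = extract_python_docstring_py_alt lines start_line
instance (lines : List String) (start_line : Int) (out : String) : Decidable (Spec_extract_python_docstring_py lines start_line out) := by unfold Spec_extract_python_docstring_py; infer_instance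

-- ===== CLAIM (what is proved, stated in full; the proofs are below) =====
def Claim_equal_extract_python_docstring_py : Prop := ∀ (lines : List String) (start_line : Int), Dom_extract_python_docstring_py lines start_line → Pre_extract_python_docstring_py lines start_line → Spec_extract_python_docstring_py lines start_line (extract_python_docstring_py lines start_line)

-- ===== LEMMAS AND PROOFS =====

-- the lines A's inner loop collects, as a take-until-inclusive over the index list
def pvTakeIncl (lines : List String) : List Int → List String
  | [] => []
  | k :: rest =>
      PySem.List.pyGetD lines k "" ::
        (if pvHasDelim (PySem.List.pyGetD lines k "") = true then [] else pvTakeIncl lines rest)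

-- '\n'.join(a :: l) seen as a followed by this tail
def pvJoinTail : List String → String
  | [] => ""
  | x :: t => "\n" ++ x ++ pvJoinTail t

lemma pvA_inner_eq_takeIncl (lines : List String) (j : Int) :
    ∀ (ks : List Int) (acc : List String), (∀ k ∈ ks, j < k) →
      pvA_inner lines j ks acc = acc.reverse ++ pvTakeIncl lines ks := by
  intro ks
  induction ks with
  | nil => intro acc _; simp [pvA_inner, pvTakeIncl]
  | cons k rest ih =>
      intro acc hk
      have hjk : j < k := hk k (by simp)
      by_cases h : pvHasDelim (PySem.List.pyGetD lines k "") = true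
      · simp [pvA_inner, pvTakeIncl, hjk, h]
      · simp only [pvA_inner, pvTakeIncl, h]
        rw [if_neg (by simp [h]), ih _ (fun x hx => hk x (by simp [hx]))]
        simp

lemma pvJoin_cons_cons (a x : String) (t : List String) :
    PySem.Str.join "\n" (a :: x :: t) = a ++ "\n" ++ PySem.Str.join "\n" (x :: t) := by
  apply String.toList_inj.mp
  simp [PySem.Str.toList_join, String.toList_append, PySem.Chars.join_cons_cons]

lemma pvJoin_eq_joinTail (a : String) (l : List String) :
    PySem.Str.join "\n" (a :: l) = a ++ pvJoinTail l := by
  induction l generalizing a with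
  | nil =>
      apply String.toList_inj.mp
      simp [PySem.Str.toList_join, PySem.Chars.join_singleton, pvJoinTail]
  | cons x t ih =>
      rw [pvJoin_cons_cons, ih x]
      simp [pvJoinTail, String.append_assoc]

-- A's post-opening collection, joined, is B's collect over the dropped suffix
lemma pvJoinTail_takeIncl_eq_collect (lines : List String) :
    ∀ (f : Nat) (m : Int), 0 ≤ m → m ≤ (lines.length : Int) → ((lines.length : Int) - m).toNat ≤ f →
      pvJoinTail (pvTakeIncl lines (PySem.List.pyRange m ((lines.length : Int)) 1)) =
        pvB_collect (lines.drop m.toNat) := by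
  intro f
  induction f with
  | zero =>
      intro m hm hmn hf
      have hmn' : m = (lines.length : Int) := by omega
      subst hmn'
      rw [PySem.List.pyRange_one_eq_nil (by simp)]
      simp [pvTakeIncl, pvJoinTail, pvB_collect]
  | succ f ih =>
      intro m hm hmn hf
      by_cases hlt : m < (lines.length : Int)
      · have hN : m.toNat < lines.length := by omega
        rw [PySem.List.pyRange_one_cons (by simpa using hlt),
            List.drop_eq_getElem_cons hN]
        have hg : PySem.List.pyGetD lines m "" = lines[m.toNat] :=
          PySem.List.pyGetD_eq_getElem lines "" hm (by exact_mod_cast hlt)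
        have h1 : (m + 1).toNat = m.toNat + 1 := by omega
        by_cases h : pvHasDelim lines[m.toNat] = true
        · simp [pvTakeIncl, hg, h, pvJoinTail, pvB_collect, String.append_empty]
        · have ha : (0:Int) ≤ m + 1 := by omega
          have hb : m + 1 ≤ (lines.length : Int) := by omega
          have hc : ((lines.length : Int) - (m + 1)).toNat ≤ f := by omega
          have hih := ih (m + 1) ha hb hc
          rw [h1] at hih
          simp [pvTakeIncl, hg, h, pvJoinTail, pvB_collect, hih, String.append_assoc]
      · have hmn' : m = (lines.length : Int) := by omega
        subst hmn'
        rw [PySem.List.pyRange_one_eq_nil (by simp)]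
        simp [pvTakeIncl, pvJoinTail, pvB_collect]

-- the opening-found branch: A's whole inner loop joined equals B's head ++ collect
lemma pvInner_join_eq (lines : List String) (j : Int) (hj : 0 ≤ j)
    (hlt : j < (lines.length : Int)) :
    PySem.Str.join "\n" (pvA_inner lines j (PySem.List.pyRange j (PySem.List.len lines) 1) []) =
      PySem.List.pyGetD lines j "" ++ pvB_collect (lines.drop (j.toNat + 1)) := by
  simp only [PySem.List.len_eq]
  rw [PySem.List.pyRange_one_cons hlt]
  simp only [pvA_inner]
  rw [if_neg (by simp)]
  rw [pvA_inner_eq_takeIncl lines j _ _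
      (by intro k hk; rw [PySem.List.mem_pyRange_one] at hk; omega)]
  simp only [List.reverse_cons, List.reverse_nil, List.nil_append, List.cons_append,
    List.nil_append]
  rw [pvJoin_eq_joinTail]
  have h1 : (j + 1).toNat = j.toNat + 1 := by omega
  have hih := pvJoinTail_takeIncl_eq_collect lines ((lines.length : Int) - (j + 1)).toNat (j + 1)
      (by omega) (by omega) (le_refl _)
  rw [h1] at hih
  rw [hih]

-- A's outer search over the 10-index window equals B's budgeted search over the suffix
lemma pvOuter_eq_search (lines : List String) :
    ∀ (b : Nat) (m : Int), 0 ≤ m →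
      pvA_outer lines (PySem.List.pyRange m (min (m + (b : Int)) (PySem.List.len lines)) 1) =
        pvB_search (lines.drop m.toNat) b := by
  intro b
  induction b with
  | zero =>
      intro m hm
      rw [PySem.List.pyRange_one_eq_nil (by simp only [PySem.List.len_eq]; omega)]
      simp [pvA_outer, pvB_search]
  | succ b ih =>
      intro m hm
      by_cases hlt : m < (lines.length : Int)
      · have hN : m.toNat < lines.length := by omega
        rw [PySem.List.pyRange_one_cons (by simp only [PySem.List.len_eq]; omega),
            List.drop_eq_getElem_cons hN]
        have hg : PySem.List.pyGetD lines m "" = lines[m.toNat] :=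
          PySem.List.pyGetD_eq_getElem lines "" hm (by exact_mod_cast hlt)
        simp only [pvA_outer, pvB_search, hg]
        by_cases h : pvHasDelim lines[m.toNat] = true
        · simp only [h, if_true]
          rw [← hg, pvInner_join_eq lines m hm hlt, hg]
        · simp only [h, Bool.false_eq_true, if_false]
          have hcast : (((b + 1 : Nat)) : Int) = (b : Int) + 1 := by push_cast; ring
          have harith : min (m + ((b : Int) + 1)) (PySem.List.len lines) =
              min ((m + 1) + (b : Int)) (PySem.List.len lines) := by ring_nf
          have h1 : (m + 1).toNat = m.toNat + 1 := by omega
          rw [hcast, harith, ih (m + 1) (by omega), h1]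
      · rw [PySem.List.pyRange_one_eq_nil (by simp only [PySem.List.len_eq]; omega)]
        rw [List.drop_eq_nil_of_le (by omega)]
        simp [pvA_outer, pvB_search]

-- ===== VERDICT (by name: the statement is the Claim_ definition above) =====
theorem extract_python_docstring_py_spec : Claim_equal_extract_python_docstring_py := by
  intro lines start_line _ hpre
  unfold Spec_extract_python_docstring_py extract_python_docstring_py extract_python_docstring_py_alt
  rw [PySem.List.slice_from lines hpre]
  have h10 : (start_line + 10) = start_line + ((10 : Nat) : Int) := by norm_num
  rw [h10, pvOuter_eq_search lines 10 start_line hpre]
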